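-- pv_equiv track=rewrite | github.com/JukaleManmath/Leetcode-Solutions | 4084-maximize-sum-of-squares-of-digits/4084-maximize-sum-of-squares-of-digits.py | maxSumOfSquares
-- ===== SOURCE A (Python) =====
-- def maxSumOfSquares(num: int, sum: int) -> str:
--     ans = ""
--     while num:
--         val = "9" if sum - 9 >= 0 else str(sum)
--         ans += val
--         sum -= int(val)
--         num -= 1
--
--     if sum:
--         return ""
--     return ans
-- ===== SOURCE B (Python) =====
-- def maxSumOfSquares(num: int, sum: int) -> str:
--     q, r = divmod(sum, 9)
--     d = q + (1 if r else 0)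
--     if d > num:
--         return ""
--     return "9" * q + (str(r) if r else "") + "0" * (num - d)
-- ===== Notes on version B (the rewrite author's own statement) =====
-- stated objective: faster
-- what changed: A's per-digit greedy while-loop is replaced by the closed form divmod(sum, 9): q nines, one remainder digit, and zero padding assembled as three string repetitions, with the impossibility test d > num done up front.
-- outside the precondition, e.g. on maxSumOfSquares(-1, 5): A does not finish within the time limit, B returns ''; on maxSumOfSquares(1, -3): A returns '-3', B returns '60'
import Mathlib
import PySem

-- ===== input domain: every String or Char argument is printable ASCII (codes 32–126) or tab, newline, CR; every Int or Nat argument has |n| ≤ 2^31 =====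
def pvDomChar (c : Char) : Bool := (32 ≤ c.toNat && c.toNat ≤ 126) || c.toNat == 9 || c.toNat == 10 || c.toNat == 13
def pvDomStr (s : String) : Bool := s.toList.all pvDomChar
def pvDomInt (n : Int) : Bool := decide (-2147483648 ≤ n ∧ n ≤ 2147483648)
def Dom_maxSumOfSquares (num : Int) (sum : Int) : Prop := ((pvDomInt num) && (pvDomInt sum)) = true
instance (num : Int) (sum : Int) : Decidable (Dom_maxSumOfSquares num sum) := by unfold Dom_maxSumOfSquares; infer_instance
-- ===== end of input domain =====

-- B replaces A's per-digit greedy loop by the closed form divmod(sum, 9) and three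
-- computed string runs (objective: simpler).

-- ===== PORT A =====
-- 'while num' loop; the '0 < num' exit also covers num < 0, where Python diverges
-- (excluded by Pre_).  int(val) is 9 when val = "9" and sum when val = str(sum).
def maxSumOfSquaresLoop (num : Int) (sum : Int) (ans : String) : String :=
  if 0 < num then
    let val : String := if sum - 9 ≥ 0 then "9" else PySem.Int.toStr sum
    let v : Int := if sum - 9 ≥ 0 then 9 else sum
    maxSumOfSquaresLoop (num - 1) (sum - v) (ans ++ val)
  else
    if sum ≠ 0 then "" else ans
termination_by num.toNat
decreasing_by omega

def maxSumOfSquares (num : Int) (sum : Int) : String :=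
  maxSumOfSquaresLoop num sum ""

-- ===== PORT B =====
def maxSumOfSquares_alt (num : Int) (sum : Int) : String :=
  let q := PySem.Int.floordiv sum 9
  let r := PySem.Int.mod sum 9
  let d := q + (if r ≠ 0 then 1 else 0)
  if d > num then ""
  else
    String.ofList (PySem.List.pyRepeat ['9'] q)
      ++ (if r ≠ 0 then PySem.Int.toStr r else "")
      ++ String.ofList (PySem.List.pyRepeat ['0'] (num - d))

-- ===== PRECONDITION & SPEC =====
-- Pre_ excludes num < 0, where A's 'while num' loop never terminates, and restricts
-- sum to the problem's natural domain sum ≥ 0 (a sum of squares of digits): for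
-- negative sum A's string concatenation emits the token str(sum) (e.g. "-3"), an
-- artefact of the greedy loop, while B returns its arithmetic value there.
def Pre_maxSumOfSquares (num : Int) (sum : Int) : Prop := 0 ≤ num ∧ 0 ≤ sum
instance (num : Int) (sum : Int) : Decidable (Pre_maxSumOfSquares num sum) := by unfold Pre_maxSumOfSquares; infer_instance
def pvWitness_maxSumOfSquares : Int × Int := (3, 20)
def Spec_maxSumOfSquares (num : Int) (sum : Int) (out : String) : Prop := out = maxSumOfSquares_alt num sum
instance (num : Int) (sum : Int) (out : String) : Decidable (Spec_maxSumOfSquares num sum out) := by unfold Spec_maxSumOfSquares; infer_instance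

-- ===== CLAIM (what is proved, stated in full; the proofs are below) =====
def Claim_equal_maxSumOfSquares : Prop := ∀ (num : Int) (sum : Int), Dom_maxSumOfSquares num sum → Pre_maxSumOfSquares num sum → Spec_maxSumOfSquares num sum (maxSumOfSquares num sum)

-- ===== LEMMAS AND PROOFS =====

-- Characterisation of A's greedy loop on 0 ≤ sum, num = n : Nat.
theorem maxSumOfSquaresLoop_spec (n : Nat) : ∀ (sum : Int), 0 ≤ sum → ∀ (ans : String),
    maxSumOfSquaresLoop (n : Int) sum ans =
      if sum / 9 + (if sum % 9 ≠ 0 then 1 else 0) ≤ (n : Int) then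
        ans ++ String.ofList (List.replicate (sum / 9).toNat '9')
            ++ (if sum % 9 ≠ 0 then PySem.Int.toStr (sum % 9) else "")
            ++ String.ofList (List.replicate ((n : Int) - (sum / 9 + (if sum % 9 ≠ 0 then 1 else 0))).toNat '0')
      else "" := by
  induction n with
  | zero =>
    intro sum hs ans
    rw [maxSumOfSquaresLoop, if_neg (by norm_num : ¬ (0 : Int) < ((0 : Nat) : Int))]
    by_cases h : sum = 0
    · subst h; norm_num
    · rw [if_pos h]
      have h1 : ¬ (sum / 9 + (if sum % 9 ≠ 0 then 1 else 0) ≤ ((0 : Nat) : Int)) := by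
        by_cases hm : sum % 9 = 0
        · rw [if_neg (by simpa using hm)]; push_cast; omega
        · rw [if_pos hm]; push_cast; omega
      rw [if_neg h1]
  | succ n ih =>
    intro sum hs ans
    have hn : (0 : Int) < ((n + 1 : Nat) : Int) := by positivity
    have hcast : ((n + 1 : Nat) : Int) - 1 = (n : Int) := by push_cast; ring
    rw [maxSumOfSquaresLoop, if_pos hn]
    by_cases h9 : sum - 9 ≥ 0
    · -- append a '9', recurse on sum - 9
      rw [if_pos h9, if_pos h9]
      show maxSumOfSquaresLoop (((n + 1 : Nat) : Int) - 1) (sum - 9) (ans ++ "9") = _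
      rw [hcast, ih (sum - 9) (by omega) (ans ++ "9")]
      have hd : (sum - 9) / 9 = sum / 9 - 1 := by omega
      have hm : (sum - 9) % 9 = sum % 9 := by omega
      rw [hd, hm]
      by_cases hc : sum / 9 - 1 + (if sum % 9 ≠ 0 then 1 else 0) ≤ (n : Int)
      · have hc' : sum / 9 + (if sum % 9 ≠ 0 then 1 else 0) ≤ ((n + 1 : Nat) : Int) := by
          push_cast at hc ⊢; omega
        rw [if_pos hc, if_pos hc']
        have hrepl : (sum / 9).toNat = (sum / 9 - 1).toNat + 1 := by omega
        have hz : (((n + 1 : Nat) : Int) - (sum / 9 + (if sum % 9 ≠ 0 then 1 else 0))).toNat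
            = ((n : Int) - (sum / 9 - 1 + (if sum % 9 ≠ 0 then 1 else 0))).toNat := by
          push_cast; omega
        rw [hrepl, hz, List.replicate_succ]
        conv_rhs => rw [show ('9' :: List.replicate (sum / 9 - 1).toNat '9')
                          = ['9'] ++ List.replicate (sum / 9 - 1).toNat '9' from rfl,
                        String.ofList_append]
        rw [show ("9" : String) = String.ofList ['9'] from rfl]
        simp [String.append_assoc]
      · have hc' : ¬ (sum / 9 + (if sum % 9 ≠ 0 then 1 else 0) ≤ ((n + 1 : Nat) : Int)) := by
          push_cast at hc ⊢; omega
        rw [if_neg hc, if_neg hc']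
    · -- last digit str(sum) (0 ≤ sum < 9), then zeros
      rw [if_neg h9, if_neg h9]
      show maxSumOfSquaresLoop (((n + 1 : Nat) : Int) - 1) (sum - sum) (ans ++ PySem.Int.toStr sum) = _
      rw [hcast, sub_self, ih 0 le_rfl (ans ++ PySem.Int.toStr sum)]
      simp only [Int.zero_ediv, Int.zero_emod, ne_eq, not_true_eq_false, if_false, add_zero,
        Int.toNat_zero, List.replicate_zero, String.ofList_nil, String.append_empty]
      rw [if_pos (show (0 : Int) ≤ (n : Int) by positivity)]
      have hd : sum / 9 = 0 := by omega
      have hm : sum % 9 = sum := by omega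
      rw [hd, hm, Int.toNat_zero, List.replicate_zero, String.ofList_nil, String.append_empty]
      by_cases h0 : sum = 0
      · subst h0
        rw [if_neg (show ¬ ((0 : Int) ≠ 0) from fun h => h rfl),
            if_neg (show ¬ ((0 : Int) ≠ 0) from fun h => h rfl),
            if_pos (show (0 : Int) + 0 ≤ ((n + 1 : Nat) : Int) by positivity)]
        have ht : (((n + 1 : Nat) : Int) - (0 + 0)).toNat = n + 1 := by omega
        have hn' : (((n : Nat) : Int) - 0).toNat = n := by omega
        rw [ht, hn', List.replicate_succ, String.append_empty,
            show PySem.Int.toStr 0 = String.ofList ['0'] from rfl]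
        conv_rhs => rw [show ('0' :: List.replicate n '0') = ['0'] ++ List.replicate n '0' from rfl,
                        String.ofList_append]
        simp [String.append_assoc]
      · rw [if_pos h0, if_pos h0,
            if_pos (show (0 : Int) + 1 ≤ ((n + 1 : Nat) : Int) by push_cast; omega)]
        have h1 : (((n + 1 : Nat) : Int) - (0 + 1)).toNat = (((n : Nat) : Int) - 0).toNat := by
          push_cast; omega
        rw [h1]

-- ===== VERDICT (by name: the statement is the Claim_ definition above) =====
theorem maxSumOfSquares_spec : Claim_equal_maxSumOfSquares := by
  intro num sum _ ⟨hn, hs⟩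
  unfold Spec_maxSumOfSquares maxSumOfSquares maxSumOfSquares_alt
  lift num to Nat using hn with n
  rw [maxSumOfSquaresLoop_spec n sum hs ""]
  rw [PySem.Int.floordiv_eq_ediv_of_pos (by norm_num), PySem.Int.mod_eq_emod_of_pos (by norm_num)]
  simp only [PySem.List.pyRepeat_singleton]
  by_cases hm : sum % 9 = 0
  · rw [if_neg (show ¬ (sum % 9 ≠ 0) from fun h => h hm),
        if_neg (show ¬ (sum % 9 ≠ 0) from fun h => h hm)]
    by_cases hc : sum / 9 + 0 ≤ (n : Int)
    · rw [if_pos hc, if_neg (by omega)]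
      simp
    · rw [if_neg hc, if_pos (by omega)]
  · rw [if_pos hm, if_pos hm]
    by_cases hc : sum / 9 + 1 ≤ (n : Int)
    · rw [if_pos hc, if_neg (by omega)]
      simp
    · rw [if_neg hc, if_pos (by omega)]
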